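-- pv_equiv track=rewrite | github.com/jk-jung/problem-solving | codewars/5kyu/5_The Wrong-Way Cow.py | find_wrong_way_cow
-- ===== SOURCE A (Python) =====
-- def find_wrong_way_cow(v):
--     n, m = len(v), len(v[0])
--     dx = [1 ,0, -1, 0]
--     dy = [0, 1, 0, -1]
--     dc = [[], [], [], []]
--     for i in range(n):
--         for j in range(m):
--             if v[i][j] == 'c':
--                 for k in range(4):
--                     y = i + dy[k]
--                     x = j + dx[k]
--                     if y < 0 or x < 0 or y == n or x == m or v[y][x] != 'o': continue
--                     y = y + dy[k]
--                     x = x + dx[k]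
--                     if y < 0 or x < 0 or y == n or x == m or v[y][x] != 'w': continue
--                     dc[k].append([j, i])
--
--     return [x for x in dc if len(x) == 1][0][0]
-- ===== SOURCE B (Python) =====
-- def find_wrong_way_cow(v):
--     m = len(v[0])
--     rows = [s[:m] for s in v]
--     cols = [''.join(r[j] for r in rows) for j in range(m)]
--     buckets = [[], [], [], []]
--     for r, s in enumerate(rows):
--         for i in range(len(s) - 2):
--             pat = s[i:i + 3]
--             if pat == 'cow':
--                 buckets[0].append([i, r])
--             elif pat == 'woc':
--                 buckets[2].append([i + 2, r])
--     for c, s in enumerate(cols):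
--         for i in range(len(s) - 2):
--             pat = s[i:i + 3]
--             if pat == 'cow':
--                 buckets[1].append([c, i])
--             elif pat == 'woc':
--                 buckets[3].append([c, i + 2])
--     return [b for b in buckets if len(b) == 1][0][0]
-- ===== Notes on version B (the rewrite author's own statement) =====
-- stated objective: idiomatic
-- what changed: A probes every 'c' cell in 4 directions with per-cell boundary checks; B builds the row strings and column strings once and scans each for the substrings 'cow' and 'woc', collecting matches into the four direction buckets.
import Mathlib
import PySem

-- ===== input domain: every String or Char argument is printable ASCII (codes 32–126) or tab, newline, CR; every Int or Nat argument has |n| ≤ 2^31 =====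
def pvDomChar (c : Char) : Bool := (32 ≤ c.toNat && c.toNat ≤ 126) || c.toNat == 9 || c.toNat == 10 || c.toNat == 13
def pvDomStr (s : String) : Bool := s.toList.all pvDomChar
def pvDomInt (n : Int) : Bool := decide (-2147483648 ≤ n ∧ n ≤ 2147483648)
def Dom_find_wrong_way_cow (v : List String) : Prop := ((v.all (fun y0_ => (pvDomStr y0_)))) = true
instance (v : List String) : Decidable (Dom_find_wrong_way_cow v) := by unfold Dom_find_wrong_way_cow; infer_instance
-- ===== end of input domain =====

-- B replaces A's per-cell 4-direction probing with pattern scanning over row/column strings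
-- ('cow'/'woc' occurrences collected into the four direction buckets); objective: idiomatic/alternative, not faster.


-- ===== PORT A =====
-- v[y][x] (chained Python indexing; none = IndexError)
def pyCharAt (v : List String) (y x : Int) : Option Char :=
  match PySem.List.pyGet? v y with
  | some s => PySem.Str.pyGet? s x
  | none => none

def find_wrong_way_cow (v : List String) : List Int :=
  let n : Int := (v.length : Int)
  -- len(v[0]); Python raises on empty v (excluded by Pre_), the getD "" is never hit there
  let m : Int := PySem.Str.len ((PySem.List.pyGet? v 0).getD "")
  let dx : List Int := [1, 0, -1, 0]
  let dy : List Int := [0, 1, 0, -1]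
  let dc0 : List (List (List Int)) := [[], [], [], []]
  let dc := (PySem.List.pyRange 0 n 1).foldl (fun dc i =>
    (PySem.List.pyRange 0 m 1).foldl (fun dc j =>
      if pyCharAt v i j == some 'c' then
        (PySem.List.pyRange 0 4 1).foldl (fun dc k =>
          let y := i + PySem.List.pyGetD dy k 0
          let x := j + PySem.List.pyGetD dx k 0
          if y < 0 ∨ x < 0 ∨ y = n ∨ x = m ∨ ¬(pyCharAt v y x == some 'o') then dc
          else
            let y2 := y + PySem.List.pyGetD dy k 0
            let x2 := x + PySem.List.pyGetD dx k 0
            if y2 < 0 ∨ x2 < 0 ∨ y2 = n ∨ x2 = m ∨ ¬(pyCharAt v y2 x2 == some 'w') then dc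
            else dc.set k.toNat ((dc.getD k.toNat []) ++ [[j, i]])) dc
      else dc) dc) dc0
  ((dc.filter (fun x => x.length == 1)).headI).headI

-- ===== PORT B =====
def find_wrong_way_cow_alt (v : List String) : List Int :=
  let m : Int := PySem.Str.len ((PySem.List.pyGet? v 0).getD "")
  let rows : List String := v.map (fun s => PySem.Str.slice s none (some m))
  -- ''.join(r[j] for r in rows): r[j] ported as the one-char slice r[j:j+1]; exact whenever
  -- j < len(r) (guaranteed under Pre_, where every row has length ≥ m)
  let cols : List String := (PySem.List.pyRange 0 m 1).map (fun j =>
    PySem.Str.join "" (rows.map (fun r => PySem.Str.slice r (some j) (some (j + 1)))))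
  let bk : List (List Int) × List (List Int) × List (List Int) × List (List Int) := ([], [], [], [])
  let bk := (PySem.List.enumerate rows 0).foldl (fun bk rs =>
    (PySem.List.pyRange 0 (PySem.Str.len rs.2 - 2) 1).foldl (fun bk i =>
      let pat := PySem.Str.slice rs.2 (some i) (some (i + 3))
      if pat == "cow" then (bk.1 ++ [[i, rs.1]], bk.2.1, bk.2.2.1, bk.2.2.2)
      else if pat == "woc" then (bk.1, bk.2.1, bk.2.2.1 ++ [[i + 2, rs.1]], bk.2.2.2)
      else bk) bk) bk
  let bk := (PySem.List.enumerate cols 0).foldl (fun bk cs =>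
    (PySem.List.pyRange 0 (PySem.Str.len cs.2 - 2) 1).foldl (fun bk i =>
      let pat := PySem.Str.slice cs.2 (some i) (some (i + 3))
      if pat == "cow" then (bk.1, bk.2.1 ++ [[cs.1, i]], bk.2.2.1, bk.2.2.2)
      else if pat == "woc" then (bk.1, bk.2.1, bk.2.2.1, bk.2.2.2 ++ [[cs.1, i + 2]])
      else bk) bk) bk
  let buckets : List (List (List Int)) := [bk.1, bk.2.1, bk.2.2.1, bk.2.2.2]
  ((buckets.filter (fun b => b.length == 1)).headI).headI

-- ===== PRECONDITION & SPEC =====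
-- grid width = len(v[0])
def pvW (v : List String) : Nat := (v.headI).toList.length
-- the rows, truncated to the grid width
def pvRowStrs (v : List String) : List String := v.map (fun s => String.mk (s.toList.take (pvW v)))
-- the columns of the (truncated) grid
def pvColStrs (v : List String) : List String :=
  (List.range (pvW v)).map (fun j =>
    String.mk ((v.map (fun s => ((s.toList.take (pvW v)).drop j).take 1)).flatten))
-- total number of occurrences of the pattern p over a list of strings
def pvCnt (p : String) (l : List String) : Nat := (l.map (fun s => PySem.Str.count s p)).sum

-- Pre_ = exactly the inputs on which A returns: a nonempty grid whose rows all have at least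
-- len(v[0]) characters (otherwise v[i][j] raises IndexError), with some direction (rows or
-- columns, read forwards as "cow" or backwards as "woc") containing exactly one cow
-- (otherwise the final [...][0] raises IndexError).
def Pre_find_wrong_way_cow (v : List String) : Prop :=
  v ≠ [] ∧ (∀ s ∈ v, pvW v ≤ s.toList.length) ∧
  (pvCnt "cow" (pvRowStrs v) = 1 ∨ pvCnt "cow" (pvColStrs v) = 1 ∨
   pvCnt "woc" (pvRowStrs v) = 1 ∨ pvCnt "woc" (pvColStrs v) = 1)
instance (v : List String) : Decidable (Pre_find_wrong_way_cow v) := by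
  unfold Pre_find_wrong_way_cow; infer_instance

def pvWitness_find_wrong_way_cow : List String := ["cow", "..."]

def Spec_find_wrong_way_cow (v : List String) (out : List Int) : Prop := out = find_wrong_way_cow_alt v
instance (v : List String) (out : List Int) : Decidable (Spec_find_wrong_way_cow v out) := by
  unfold Spec_find_wrong_way_cow; infer_instance

-- ===== CLAIM (what is proved, stated in full; the proofs are below) =====
def Claim_equal_find_wrong_way_cow : Prop := ∀ (v : List String), Dom_find_wrong_way_cow v → Pre_find_wrong_way_cow v → Spec_find_wrong_way_cow v (find_wrong_way_cow v)

-- ===== LEMMAS AND PROOFS =====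

-- character of the grid at row i, column j (untruncated rows)
def pvAt (v : List String) (i j : Nat) : Option Char := v[i]?.bind (fun s => s.toList[j]?)

-- horizontal 3-letter pattern a b c starting at (i, t), entirely inside the grid width
def pvH (v : List String) (a b c : Char) (i t : Nat) : Bool :=
  decide (t + 2 < pvW v) && (pvAt v i t == some a) && (pvAt v i (t+1) == some b) &&
    (pvAt v i (t+2) == some c)
-- vertical 3-letter pattern a b c starting at (t, j)
def pvV (v : List String) (a b c : Char) (t j : Nat) : Bool :=
  (pvAt v t j == some a) && (pvAt v (t+1) j == some b) && (pvAt v (t+2) j == some c)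


-- first bucket of length exactly 1, in direction order, then its single element (the final line of both Pythons)
def pvPick (dc : List (List (List Int))) : List Int :=
  ((dc.filter (fun x => x.length == 1)).headI).headI

-- a fold that appends to the four components of a 4-element list is four flatMaps
theorem pv_quadL {α : Type} (l : List α) (g : List (List (List Int)) → α → List (List (List Int)))
    (h0 h1 h2 h3 : α → List (List Int))
    (hg : ∀ d0 d1 d2 d3, ∀ x ∈ l, g [d0, d1, d2, d3] x =
      [d0 ++ h0 x, d1 ++ h1 x, d2 ++ h2 x, d3 ++ h3 x]) :
    ∀ d0 d1 d2 d3, l.foldl g [d0, d1, d2, d3] =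
      [d0 ++ l.flatMap h0, d1 ++ l.flatMap h1, d2 ++ l.flatMap h2, d3 ++ l.flatMap h3] := by
  induction l with
  | nil => intro d0 d1 d2 d3; simp
  | cons x t ih =>
    intro d0 d1 d2 d3
    have hx := hg d0 d1 d2 d3 x (by simp)
    simp only [List.foldl_cons, hx]
    rw [ih (fun d0 d1 d2 d3 y hy => hg d0 d1 d2 d3 y (by simp [hy]))]
    simp [List.append_assoc]

-- the same for a fold over a 4-tuple state
theorem pv_quadP {α : Type} (l : List α)
    (g : (List (List Int) × List (List Int) × List (List Int) × List (List Int)) → α →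
         (List (List Int) × List (List Int) × List (List Int) × List (List Int)))
    (h0 h1 h2 h3 : α → List (List Int))
    (hg : ∀ d0 d1 d2 d3, ∀ x ∈ l, g (d0, d1, d2, d3) x =
      (d0 ++ h0 x, d1 ++ h1 x, d2 ++ h2 x, d3 ++ h3 x)) :
    ∀ d0 d1 d2 d3, l.foldl g (d0, d1, d2, d3) =
      (d0 ++ l.flatMap h0, d1 ++ l.flatMap h1, d2 ++ l.flatMap h2, d3 ++ l.flatMap h3) := by
  induction l with
  | nil => intro d0 d1 d2 d3; simp
  | cons x t ih =>
    intro d0 d1 d2 d3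
    have hx := hg d0 d1 d2 d3 x (by simp)
    simp only [List.foldl_cons, hx]
    rw [ih (fun d0 d1 d2 d3 y hy => hg d0 d1 d2 d3 y (by simp [hy]))]
    simp [List.append_assoc]

theorem pv_flatMap_append_perm {α X : Type} (l : List α) (A B : α → List X) :
    (l.flatMap (fun x => A x ++ B x)).Perm (l.flatMap A ++ l.flatMap B) := by
  induction l with
  | nil => simp
  | cons x t ih =>
    simp only [List.flatMap_cons]
    refine (ih.append_left (A x ++ B x)).trans ?_
    rw [List.append_assoc, List.append_assoc]
    exact List.Perm.append_left (A x) (List.perm_append_comm_assoc _ _ _)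

theorem pv_swap_perm {X : Type} (n m : Nat) (F : Nat → Nat → List X) :
    ((List.range n).flatMap (fun i => (List.range m).flatMap (fun j => F i j))).Perm
      ((List.range m).flatMap (fun j => (List.range n).flatMap (fun i => F i j))) := by
  induction n with
  | zero => simp
  | succ n ih =>
    have key : (List.range m).flatMap (fun j => (List.range (n+1)).flatMap (fun i => F i j)) =
        (List.range m).flatMap (fun j => (List.range n).flatMap (fun i => F i j) ++ F n j) := by
      simp [List.range_succ]
    rw [key, List.range_succ, List.flatMap_append]
    exact (ih.append (by simp)).trans (pv_flatMap_append_perm _ _ _).symm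

theorem pv_restrict {X : Type} (a b : Nat) (h : b ≤ a) (g : Nat → List X)
    (hg : ∀ t, b ≤ t → g t = []) :
    (List.range a).flatMap g = (List.range b).flatMap g := by
  have ha : a = b + (a - b) := by omega
  rw [ha, List.range_add, List.flatMap_append]
  have hnil : ((List.range (a - b)).map (fun x => b + x)).flatMap g = [] := by
    rw [List.flatMap_eq_nil_iff]
    intro x hx
    simp only [List.mem_map, List.mem_range] at hx
    obtain ⟨k, _, rfl⟩ := hx
    exact hg _ (by omega)
  rw [hnil, List.append_nil]

theorem pv_shift2 {X : Type} (wd : Nat) (q : Nat → Bool) (f : Nat → List X)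
    (hq : ∀ t, q t = true → t + 2 < wd) :
    (List.range wd).flatMap (fun j => if 2 ≤ j ∧ q (j-2) = true then f (j-2) else []) =
    (List.range wd).flatMap (fun t => if q t = true then f t else []) := by
  by_cases hw : wd ≤ 2
  · have h1 : ∀ j ∈ List.range wd, (if 2 ≤ j ∧ q (j-2) = true then f (j-2) else []) = ([] : List X) := by
      intro j hj; simp only [List.mem_range] at hj
      rw [if_neg]; rintro ⟨h2, _⟩; omega
    have h2 : ∀ t ∈ List.range wd, (if q t = true then f t else []) = ([] : List X) := by
      intro t ht; simp only [List.mem_range] at ht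
      rw [if_neg]; intro hqt; have := hq t hqt; omega
    rw [List.flatMap_eq_nil_iff.mpr h1, List.flatMap_eq_nil_iff.mpr h2]
  · have hw' : 2 ≤ wd := by omega
    have hvan : ∀ t, wd - 2 ≤ t → (if q t = true then f t else []) = ([] : List X) := by
      intro t ht; rw [if_neg]; intro hqt; have := hq t hqt; omega
    conv_rhs => rw [pv_restrict wd (wd - 2) (by omega) (fun t => if q t = true then f t else []) hvan]
    have hsplit : List.range wd = List.range 2 ++ (List.range (wd - 2)).map (fun x => 2 + x) := by
      rw [← List.range_add, Nat.add_sub_cancel' hw']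
    conv_lhs => rw [hsplit]
    rw [List.flatMap_append]
    have e1 : (List.range 2).flatMap (fun j => if 2 ≤ j ∧ q (j-2) = true then f (j-2) else []) = ([] : List X) := by
      rw [List.flatMap_eq_nil_iff]
      intro j hj; simp only [List.mem_range] at hj
      rw [if_neg]; rintro ⟨h2, _⟩; omega
    rw [e1, List.nil_append, List.flatMap_map]
    congr 1
    funext t
    have h2t : 2 + t - 2 = t := by omega
    simp [Function.comp, h2t, Nat.le_add_right]

theorem pv_take3_iff {l : List Char} {a b c : Char} :
    l.take 3 = [a, b, c] ↔ (l[0]? = some a ∧ l[1]? = some b ∧ l[2]? = some c) := by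
  rcases l with _ | ⟨x, _ | ⟨y, _ | ⟨z, t⟩⟩⟩ <;> simp <;> aesop

theorem pv_droptake3_iff {l : List Char} {t : Nat} {a b c : Char} :
    (l.drop t).take 3 = [a, b, c] ↔
      (l[t]? = some a ∧ l[t+1]? = some b ∧ l[t+2]? = some c) := by
  rw [pv_take3_iff]
  simp [List.getElem?_drop]

theorem pv_pick_congr (a0 a1 a2 a3 b1 b3 : List (List Int))
    (h1 : a1.Perm b1) (h3 : a3.Perm b3) :
    pvPick [a0, a1, a2, a3] = pvPick [a0, b1, a2, b3] := by
  have l1 := h1.length_eq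
  have l3 := h3.length_eq
  by_cases c1 : a1.length = 1
  · obtain ⟨x, hx⟩ := List.length_eq_one_iff.mp c1
    subst hx
    have : b1 = [x] := List.perm_singleton.mp h1.symm
    subst this
    by_cases c3 : a3.length = 1
    · obtain ⟨y, hy⟩ := List.length_eq_one_iff.mp c3
      subst hy
      have : b3 = [y] := List.perm_singleton.mp h3.symm
      subst this
      rfl
    · simp only [pvPick, List.filter]
      have e3 : (a3.length == 1) = false := by simp [c3]
      have e3' : (b3.length == 1) = false := by simp [← l3, c3]
      simp [e3, e3']
  · simp only [pvPick, List.filter]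
    have e1 : (a1.length == 1) = false := by simp [c1]
    have e1' : (b1.length == 1) = false := by simp [← l1, c1]
    by_cases c3 : a3.length = 1
    · obtain ⟨y, hy⟩ := List.length_eq_one_iff.mp c3
      subst hy
      have : b3 = [y] := List.perm_singleton.mp h3.symm
      subst this
      simp [e1, e1']
    · have e3 : (a3.length == 1) = false := by simp [c3]
      have e3' : (b3.length == 1) = false := by simp [← l3, c3]
      simp [e1, e1', e3, e3']


theorem pv_flatMap_congr {α X : Type} (l : List α) (f g : α → List X)
    (h : ∀ x ∈ l, f x = g x) : l.flatMap f = l.flatMap g := by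
  induction l with
  | nil => simp
  | cons x t ih =>
    simp only [List.flatMap_cons, h x (by simp)]
    rw [ih (fun y hy => h y (by simp [hy]))]

theorem pvAt_lt_row {v : List String} {i j : Nat} {c : Char} (h : pvAt v i j = some c) :
    i < v.length := by
  by_contra hi
  rw [pvAt, List.getElem?_eq_none (by omega)] at h
  simp at h

theorem pyCharAt_cast (v : List String) (i j : Nat) :
    pyCharAt v (i : Int) (j : Int) = pvAt v i j := by
  rw [pyCharAt, pvAt, PySem.List.pyGet?_natCast]
  cases h : v[i]? with
  | none => simp
  | some s => simp [PySem.Str.pyGet?, PySem.Chars.pyGet?, PySem.List.pyGet?_natCast]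

-- the four direction buckets as A builds them (row-major, c-cell coordinates)
def pvF0 (v : List String) : List (List Int) :=
  (List.range v.length).flatMap (fun i => (List.range (pvW v)).flatMap (fun t =>
    if pvH v 'c' 'o' 'w' i t = true then [[(t:Int),(i:Int)]] else []))
def pvF1 (v : List String) : List (List Int) :=
  (List.range v.length).flatMap (fun i => (List.range (pvW v)).flatMap (fun j =>
    if pvV v 'c' 'o' 'w' i j = true then [[(j:Int),(i:Int)]] else []))
def pvF2 (v : List String) : List (List Int) :=
  (List.range v.length).flatMap (fun i => (List.range (pvW v)).flatMap (fun j =>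
    if 2 ≤ j ∧ pvH v 'w' 'o' 'c' i (j-2) = true then [[(j:Int),(i:Int)]] else []))
def pvF3 (v : List String) : List (List Int) :=
  (List.range v.length).flatMap (fun i => (List.range (pvW v)).flatMap (fun j =>
    if 2 ≤ i ∧ pvV v 'w' 'o' 'c' (i-2) j = true then [[(j:Int),(i:Int)]] else []))
-- the buckets as B builds them (pattern-start coordinates; columns scanned column-major)
def pvG1 (v : List String) : List (List Int) :=
  (List.range (pvW v)).flatMap (fun j => (List.range v.length).flatMap (fun t =>
    if pvV v 'c' 'o' 'w' t j = true then [[(j:Int),(t:Int)]] else []))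
def pvG2 (v : List String) : List (List Int) :=
  (List.range v.length).flatMap (fun i => (List.range (pvW v)).flatMap (fun t =>
    if pvH v 'w' 'o' 'c' i t = true then [[(t:Int)+2,(i:Int)]] else []))
def pvG3 (v : List String) : List (List Int) :=
  (List.range (pvW v)).flatMap (fun j => (List.range v.length).flatMap (fun t =>
    if pvV v 'w' 'o' 'c' t j = true then [[(j:Int),(t:Int)+2]] else []))

theorem pvF2_eq_G2 (v : List String) : pvF2 v = pvG2 v := by
  rw [pvF2, pvG2]
  apply pv_flatMap_congr
  intro i _
  have hbody : ∀ j ∈ List.range (pvW v),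
      (if 2 ≤ j ∧ pvH v 'w' 'o' 'c' i (j-2) = true then [[(j:Int),(i:Int)]] else []) =
      (if 2 ≤ j ∧ pvH v 'w' 'o' 'c' i (j-2) = true then
        [[((j-2 : Nat):Int)+2,(i:Int)]] else []) := by
    intro j _
    split_ifs with h
    · have : ((j-2 : Nat):Int)+2 = (j:Int) := by omega
      rw [this]
    · rfl
  rw [pv_flatMap_congr _ _ _ hbody]
  exact pv_shift2 (pvW v) (fun t => pvH v 'w' 'o' 'c' i t) (fun t => [[(t:Int)+2,(i:Int)]])
    (fun t ht => by
      simp only [pvH] at ht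
      simp only [Bool.and_eq_true, decide_eq_true_eq] at ht
      exact ht.1.1.1)

theorem pvF1_perm_G1 (v : List String) : (pvF1 v).Perm (pvG1 v) :=
  pv_swap_perm v.length (pvW v) (fun i j => if pvV v 'c' 'o' 'w' i j = true then [[(j:Int),(i:Int)]] else [])

theorem pvF3_perm_G3 (v : List String) : (pvF3 v).Perm (pvG3 v) := by
  refine (pv_swap_perm v.length (pvW v)
    (fun i j => if 2 ≤ i ∧ pvV v 'w' 'o' 'c' (i-2) j = true then [[(j:Int),(i:Int)]] else [])).trans ?_
  rw [pvG3]
  apply List.Perm.of_eq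
  apply pv_flatMap_congr
  intro j _
  have hbody : ∀ i ∈ List.range v.length,
      (if 2 ≤ i ∧ pvV v 'w' 'o' 'c' (i-2) j = true then [[(j:Int),(i:Int)]] else []) =
      (if 2 ≤ i ∧ pvV v 'w' 'o' 'c' (i-2) j = true then [[(j:Int),((i-2 : Nat):Int)+2]] else []) := by
    intro i _
    split_ifs with h
    · have : ((i-2 : Nat):Int)+2 = (i:Int) := by omega
      rw [this]
    · rfl
  rw [pv_flatMap_congr _ _ _ hbody]
  exact pv_shift2 v.length (fun t => pvV v 'w' 'o' 'c' t j) (fun t => [[(j:Int),(t:Int)+2]])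
    (fun t ht => by
      simp only [pvV] at ht
      simp only [Bool.and_eq_true, beq_iff_eq] at ht
      exact pvAt_lt_row ht.2)

theorem pv_step0 (v : List String) (i j : Nat) (hi : i < v.length) (hj : j < pvW v)
    (hC : pvAt v i j = some 'c') (a b c d : List (List Int)) :
    (if (↑i : Int) + PySem.List.pyGetD [0,1,0,-1] 0 0 < 0 ∨ (↑j : Int) + PySem.List.pyGetD [1,0,-1,0] 0 0 < 0 ∨
        (↑i : Int) + PySem.List.pyGetD [0,1,0,-1] 0 0 = (v.length:Int) ∨ (↑j : Int) + PySem.List.pyGetD [1,0,-1,0] 0 0 = ((pvW v : Nat):Int) ∨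
        ¬(pyCharAt v ((↑i : Int) + PySem.List.pyGetD [0,1,0,-1] 0 0) ((↑j : Int) + PySem.List.pyGetD [1,0,-1,0] 0 0) == some 'o') = true then [a,b,c,d]
     else if (↑i : Int) + PySem.List.pyGetD [0,1,0,-1] 0 0 + PySem.List.pyGetD [0,1,0,-1] 0 0 < 0 ∨ (↑j : Int) + PySem.List.pyGetD [1,0,-1,0] 0 0 + PySem.List.pyGetD [1,0,-1,0] 0 0 < 0 ∨
        (↑i : Int) + PySem.List.pyGetD [0,1,0,-1] 0 0 + PySem.List.pyGetD [0,1,0,-1] 0 0 = (v.length:Int) ∨ (↑j : Int) + PySem.List.pyGetD [1,0,-1,0] 0 0 + PySem.List.pyGetD [1,0,-1,0] 0 0 = ((pvW v : Nat):Int) ∨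
        ¬(pyCharAt v ((↑i : Int) + PySem.List.pyGetD [0,1,0,-1] 0 0 + PySem.List.pyGetD [0,1,0,-1] 0 0) ((↑j : Int) + PySem.List.pyGetD [1,0,-1,0] 0 0 + PySem.List.pyGetD [1,0,-1,0] 0 0) == some 'w') = true then [a,b,c,d]
     else ([a,b,c,d] : List (List (List Int))).set (Int.toNat 0) (([a,b,c,d] : List (List (List Int))).getD (Int.toNat 0) [] ++ [[(↑j : Int),(↑i : Int)]]))
    = [a ++ (if pvH v 'c' 'o' 'w' i j = true then [[(j:Int),(i:Int)]] else []), b, c, d] := by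
  have gdx : PySem.List.pyGetD [(1:Int),0,-1,0] 0 0 = 1 := rfl
  have gdy : PySem.List.pyGetD [(0:Int),1,0,-1] 0 0 = 0 := rfl
  simp only [gdx, gdy, add_zero, beq_iff_eq]
  have c1 : pyCharAt v (↑i) (↑j + 1) = pvAt v i (j+1) := by
    have : ((j:Int) + 1) = ((j+1 : Nat) : Int) := by omega
    rw [this, pyCharAt_cast]
  have c2 : pyCharAt v (↑i) (↑j + 1 + 1) = pvAt v i (j+2) := by
    have : ((j:Int) + 1 + 1) = ((j+2 : Nat) : Int) := by omega
    rw [this, pyCharAt_cast]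
  by_cases hH : pvH v 'c' 'o' 'w' i j = true
  · simp only [pvH, Bool.and_eq_true, decide_eq_true_eq, beq_iff_eq] at hH
    obtain ⟨⟨⟨hb, _⟩, ho⟩, hw⟩ := hH
    rw [if_neg, if_neg]
    · simp only [pvH, Bool.and_eq_true, decide_eq_true_eq, beq_iff_eq]
      rw [if_pos ⟨⟨⟨hb, hC⟩, ho⟩, hw⟩]
      rfl
    · rintro (h | h | h | h | h) <;> [omega; omega; omega; omega; exact h (c2 ▸ hw)]
    · rintro (h | h | h | h | h) <;> [omega; omega; omega; omega; exact h (c1 ▸ ho)]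
  · have hne : (a ++ (if pvH v 'c' 'o' 'w' i j = true then [[(j:Int),(i:Int)]] else [])) = a := by
      rw [if_neg hH, List.append_nil]
    rw [hne]
    simp only [pvH, Bool.and_eq_true, decide_eq_true_eq, beq_iff_eq] at hH
    by_cases h1 : ((↑i : Int) < 0 ∨ (↑j : Int) + 1 < 0 ∨ (↑i : Int) = (v.length:Int) ∨ (↑j : Int) + 1 = ((pvW v : Nat):Int) ∨ ¬pyCharAt v (↑i) (↑j + 1) = some 'o')
    · rw [if_pos h1]
    · rw [if_neg h1, if_pos]
      push_neg at h1
      obtain ⟨-, -, -, hjm, hox⟩ := h1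
      rw [c1] at hox
      by_cases hw : pvAt v i (j+2) = some 'w'
      · by_cases hbd : j + 2 < pvW v
        · exact absurd ⟨⟨⟨hbd, hC⟩, hox⟩, hw⟩ hH
        · right; right; right; left; omega
      · right; right; right; right
        rw [c2]; exact fun h => hw h

theorem pv_step1 (v : List String) (i j : Nat) (hi : i < v.length) (hj : j < pvW v)
    (hC : pvAt v i j = some 'c') (a b c d : List (List Int)) :
    (if (↑i : Int) + PySem.List.pyGetD [0,1,0,-1] 1 0 < 0 ∨ (↑j : Int) + PySem.List.pyGetD [1,0,-1,0] 1 0 < 0 ∨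
        (↑i : Int) + PySem.List.pyGetD [0,1,0,-1] 1 0 = (v.length:Int) ∨ (↑j : Int) + PySem.List.pyGetD [1,0,-1,0] 1 0 = ((pvW v : Nat):Int) ∨
        ¬(pyCharAt v ((↑i : Int) + PySem.List.pyGetD [0,1,0,-1] 1 0) ((↑j : Int) + PySem.List.pyGetD [1,0,-1,0] 1 0) == some 'o') = true then [a,b,c,d]
     else if (↑i : Int) + PySem.List.pyGetD [0,1,0,-1] 1 0 + PySem.List.pyGetD [0,1,0,-1] 1 0 < 0 ∨ (↑j : Int) + PySem.List.pyGetD [1,0,-1,0] 1 0 + PySem.List.pyGetD [1,0,-1,0] 1 0 < 0 ∨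
        (↑i : Int) + PySem.List.pyGetD [0,1,0,-1] 1 0 + PySem.List.pyGetD [0,1,0,-1] 1 0 = (v.length:Int) ∨ (↑j : Int) + PySem.List.pyGetD [1,0,-1,0] 1 0 + PySem.List.pyGetD [1,0,-1,0] 1 0 = ((pvW v : Nat):Int) ∨
        ¬(pyCharAt v ((↑i : Int) + PySem.List.pyGetD [0,1,0,-1] 1 0 + PySem.List.pyGetD [0,1,0,-1] 1 0) ((↑j : Int) + PySem.List.pyGetD [1,0,-1,0] 1 0 + PySem.List.pyGetD [1,0,-1,0] 1 0) == some 'w') = true then [a,b,c,d]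
     else ([a,b,c,d] : List (List (List Int))).set (Int.toNat 1) (([a,b,c,d] : List (List (List Int))).getD (Int.toNat 1) [] ++ [[(↑j : Int),(↑i : Int)]]))
    = [a, b ++ (if pvV v 'c' 'o' 'w' i j = true then [[(j:Int),(i:Int)]] else []), c, d] := by
  have gdx : PySem.List.pyGetD [(1:Int),0,-1,0] 1 0 = 0 := rfl
  have gdy : PySem.List.pyGetD [(0:Int),1,0,-1] 1 0 = 1 := rfl
  simp only [gdx, gdy, add_zero, beq_iff_eq]
  have c1 : pyCharAt v (↑i + 1) (↑j) = pvAt v (i+1) j := by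
    have h : ((i:Int) + 1) = ((i+1 : Nat) : Int) := by omega
    rw [h, pyCharAt_cast]
  have c2 : pyCharAt v (↑i + 1 + 1) (↑j) = pvAt v (i+2) j := by
    have h : ((i:Int) + 1 + 1) = ((i+2 : Nat) : Int) := by omega
    rw [h, pyCharAt_cast]
  by_cases hH : pvV v 'c' 'o' 'w' i j = true
  · simp only [pvV, Bool.and_eq_true, beq_iff_eq] at hH
    obtain ⟨⟨hc1, ho⟩, hw⟩ := hH
    have hlo := pvAt_lt_row ho
    have hlw := pvAt_lt_row hw
    rw [if_neg, if_neg]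
    · simp only [pvV, Bool.and_eq_true, beq_iff_eq]
      rw [if_pos ⟨⟨hc1, ho⟩, hw⟩]
      rfl
    · rintro (h | h | h | h | h) <;> [omega; omega; omega; omega; exact h (c2 ▸ hw)]
    · rintro (h | h | h | h | h) <;> [omega; omega; omega; omega; exact h (c1 ▸ ho)]
  · have hne : (b ++ (if pvV v 'c' 'o' 'w' i j = true then [[(j:Int),(i:Int)]] else [])) = b := by
      rw [if_neg hH, List.append_nil]
    rw [hne]
    simp only [pvV, Bool.and_eq_true, beq_iff_eq] at hH
    by_cases h1 : ((↑i : Int) + 1 < 0 ∨ (↑j : Int) < 0 ∨ (↑i : Int) + 1 = (v.length:Int) ∨ (↑j : Int) = ((pvW v : Nat):Int) ∨ ¬pyCharAt v (↑i + 1) (↑j) = some 'o')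
    · rw [if_pos h1]
    · rw [if_neg h1, if_pos]
      push_neg at h1
      obtain ⟨-, -, -, -, hox⟩ := h1
      rw [c1] at hox
      right; right; right; right
      rw [c2]
      intro hwx
      exact hH ⟨⟨hC, hox⟩, hwx⟩

theorem pv_step2 (v : List String) (i j : Nat) (hi : i < v.length) (hj : j < pvW v)
    (hC : pvAt v i j = some 'c') (a b c d : List (List Int)) :
    (if (↑i : Int) + PySem.List.pyGetD [0,1,0,-1] 2 0 < 0 ∨ (↑j : Int) + PySem.List.pyGetD [1,0,-1,0] 2 0 < 0 ∨
        (↑i : Int) + PySem.List.pyGetD [0,1,0,-1] 2 0 = (v.length:Int) ∨ (↑j : Int) + PySem.List.pyGetD [1,0,-1,0] 2 0 = ((pvW v : Nat):Int) ∨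
        ¬(pyCharAt v ((↑i : Int) + PySem.List.pyGetD [0,1,0,-1] 2 0) ((↑j : Int) + PySem.List.pyGetD [1,0,-1,0] 2 0) == some 'o') = true then [a,b,c,d]
     else if (↑i : Int) + PySem.List.pyGetD [0,1,0,-1] 2 0 + PySem.List.pyGetD [0,1,0,-1] 2 0 < 0 ∨ (↑j : Int) + PySem.List.pyGetD [1,0,-1,0] 2 0 + PySem.List.pyGetD [1,0,-1,0] 2 0 < 0 ∨
        (↑i : Int) + PySem.List.pyGetD [0,1,0,-1] 2 0 + PySem.List.pyGetD [0,1,0,-1] 2 0 = (v.length:Int) ∨ (↑j : Int) + PySem.List.pyGetD [1,0,-1,0] 2 0 + PySem.List.pyGetD [1,0,-1,0] 2 0 = ((pvW v : Nat):Int) ∨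
        ¬(pyCharAt v ((↑i : Int) + PySem.List.pyGetD [0,1,0,-1] 2 0 + PySem.List.pyGetD [0,1,0,-1] 2 0) ((↑j : Int) + PySem.List.pyGetD [1,0,-1,0] 2 0 + PySem.List.pyGetD [1,0,-1,0] 2 0) == some 'w') = true then [a,b,c,d]
     else ([a,b,c,d] : List (List (List Int))).set (Int.toNat 2) (([a,b,c,d] : List (List (List Int))).getD (Int.toNat 2) [] ++ [[(↑j : Int),(↑i : Int)]]))
    = [a, b, c ++ (if 2 ≤ j ∧ pvH v 'w' 'o' 'c' i (j-2) = true then [[(j:Int),(i:Int)]] else []), d] := by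
  have gdx : PySem.List.pyGetD [(1:Int),0,-1,0] 2 0 = -1 := rfl
  have gdy : PySem.List.pyGetD [(0:Int),1,0,-1] 2 0 = 0 := rfl
  simp only [gdx, gdy, add_zero, beq_iff_eq]
  by_cases hH : 2 ≤ j ∧ pvH v 'w' 'o' 'c' i (j-2) = true
  · obtain ⟨h2j, hH⟩ := hH
    simp only [pvH, Bool.and_eq_true, decide_eq_true_eq, beq_iff_eq] at hH
    obtain ⟨⟨⟨hb, hwc⟩, ho⟩, hcc⟩ := hH
    have e1 : j - 2 + 1 = j - 1 := by omega
    have e2 : j - 2 + 2 = j := by omega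
    rw [e1] at ho
    have c1 : pyCharAt v (↑i) (↑j + -1) = pvAt v i (j-1) := by
      have h : ((j:Int) + -1) = ((j-1 : Nat) : Int) := by omega
      rw [h, pyCharAt_cast]
    have c2 : pyCharAt v (↑i) (↑j + -1 + -1) = pvAt v i (j-2) := by
      have h : ((j:Int) + -1 + -1) = ((j-2 : Nat) : Int) := by omega
      rw [h, pyCharAt_cast]
    rw [if_neg, if_neg]
    · simp only [pvH, Bool.and_eq_true, decide_eq_true_eq, beq_iff_eq]
      rw [if_pos ⟨h2j, ⟨⟨⟨hb, hwc⟩, e1 ▸ ho⟩, hcc⟩⟩]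
      rfl
    · rintro (h | h | h | h | h) <;> [omega; omega; omega; omega; exact h (c2 ▸ hwc)]
    · rintro (h | h | h | h | h) <;> [omega; omega; omega; omega; exact h (c1 ▸ ho)]
  · have hne : (c ++ (if 2 ≤ j ∧ pvH v 'w' 'o' 'c' i (j-2) = true then [[(j:Int),(i:Int)]] else [])) = c := by
      rw [if_neg hH, List.append_nil]
    rw [hne]
    by_cases h1 : ((↑i : Int) < 0 ∨ (↑j : Int) + -1 < 0 ∨ (↑i : Int) = (v.length:Int) ∨ (↑j : Int) + -1 = ((pvW v : Nat):Int) ∨ ¬pyCharAt v (↑i) (↑j + -1) = some 'o')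
    · rw [if_pos h1]
    · rw [if_neg h1, if_pos]
      push_neg at h1
      obtain ⟨-, hj1, -, -, hox⟩ := h1
      have hj1' : 1 ≤ j := by omega
      by_cases h2j : 2 ≤ j
      · have c1 : pyCharAt v (↑i) (↑j + -1) = pvAt v i (j-1) := by
          have h : ((j:Int) + -1) = ((j-1 : Nat) : Int) := by omega
          rw [h, pyCharAt_cast]
        have c2 : pyCharAt v (↑i) (↑j + -1 + -1) = pvAt v i (j-2) := by
          have h : ((j:Int) + -1 + -1) = ((j-2 : Nat) : Int) := by omega
          rw [h, pyCharAt_cast]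
        rw [c1] at hox
        right; right; right; right
        rw [c2]
        intro hwx
        apply hH
        refine ⟨h2j, ?_⟩
        simp only [pvH, Bool.and_eq_true, decide_eq_true_eq, beq_iff_eq]
        have e1 : j - 2 + 1 = j - 1 := by omega
        have e2 : j - 2 + 2 = j := by omega
        rw [e1, e2]
        exact ⟨⟨⟨by omega, hwx⟩, hox⟩, hC⟩
      · right; left
        omega

theorem pv_step3 (v : List String) (i j : Nat) (hi : i < v.length) (hj : j < pvW v)
    (hC : pvAt v i j = some 'c') (a b c d : List (List Int)) :
    (if (↑i : Int) + PySem.List.pyGetD [0,1,0,-1] 3 0 < 0 ∨ (↑j : Int) + PySem.List.pyGetD [1,0,-1,0] 3 0 < 0 ∨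
        (↑i : Int) + PySem.List.pyGetD [0,1,0,-1] 3 0 = (v.length:Int) ∨ (↑j : Int) + PySem.List.pyGetD [1,0,-1,0] 3 0 = ((pvW v : Nat):Int) ∨
        ¬(pyCharAt v ((↑i : Int) + PySem.List.pyGetD [0,1,0,-1] 3 0) ((↑j : Int) + PySem.List.pyGetD [1,0,-1,0] 3 0) == some 'o') = true then [a,b,c,d]
     else if (↑i : Int) + PySem.List.pyGetD [0,1,0,-1] 3 0 + PySem.List.pyGetD [0,1,0,-1] 3 0 < 0 ∨ (↑j : Int) + PySem.List.pyGetD [1,0,-1,0] 3 0 + PySem.List.pyGetD [1,0,-1,0] 3 0 < 0 ∨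
        (↑i : Int) + PySem.List.pyGetD [0,1,0,-1] 3 0 + PySem.List.pyGetD [0,1,0,-1] 3 0 = (v.length:Int) ∨ (↑j : Int) + PySem.List.pyGetD [1,0,-1,0] 3 0 + PySem.List.pyGetD [1,0,-1,0] 3 0 = ((pvW v : Nat):Int) ∨
        ¬(pyCharAt v ((↑i : Int) + PySem.List.pyGetD [0,1,0,-1] 3 0 + PySem.List.pyGetD [0,1,0,-1] 3 0) ((↑j : Int) + PySem.List.pyGetD [1,0,-1,0] 3 0 + PySem.List.pyGetD [1,0,-1,0] 3 0) == some 'w') = true then [a,b,c,d]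
     else ([a,b,c,d] : List (List (List Int))).set (Int.toNat 3) (([a,b,c,d] : List (List (List Int))).getD (Int.toNat 3) [] ++ [[(↑j : Int),(↑i : Int)]]))
    = [a, b, c, d ++ (if 2 ≤ i ∧ pvV v 'w' 'o' 'c' (i-2) j = true then [[(j:Int),(i:Int)]] else [])] := by
  have gdx : PySem.List.pyGetD [(1:Int),0,-1,0] 3 0 = 0 := rfl
  have gdy : PySem.List.pyGetD [(0:Int),1,0,-1] 3 0 = -1 := rfl
  simp only [gdx, gdy, add_zero, beq_iff_eq]
  by_cases hH : 2 ≤ i ∧ pvV v 'w' 'o' 'c' (i-2) j = true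
  · obtain ⟨h2i, hH⟩ := hH
    simp only [pvV, Bool.and_eq_true, beq_iff_eq] at hH
    obtain ⟨⟨hwc, ho⟩, hcc⟩ := hH
    have e1 : i - 2 + 1 = i - 1 := by omega
    rw [e1] at ho
    have c1 : pyCharAt v (↑i + -1) (↑j) = pvAt v (i-1) j := by
      have h : ((i:Int) + -1) = ((i-1 : Nat) : Int) := by omega
      rw [h, pyCharAt_cast]
    have c2 : pyCharAt v (↑i + -1 + -1) (↑j) = pvAt v (i-2) j := by
      have h : ((i:Int) + -1 + -1) = ((i-2 : Nat) : Int) := by omega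
      rw [h, pyCharAt_cast]
    rw [if_neg, if_neg]
    · simp only [pvV, Bool.and_eq_true, beq_iff_eq]
      rw [if_pos ⟨h2i, ⟨⟨hwc, e1 ▸ ho⟩, hcc⟩⟩]
      rfl
    · rintro (h | h | h | h | h) <;> [omega; omega; omega; omega; exact h (c2 ▸ hwc)]
    · rintro (h | h | h | h | h) <;> [omega; omega; omega; omega; exact h (c1 ▸ ho)]
  · have hne : (d ++ (if 2 ≤ i ∧ pvV v 'w' 'o' 'c' (i-2) j = true then [[(j:Int),(i:Int)]] else [])) = d := by
      rw [if_neg hH, List.append_nil]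
    rw [hne]
    by_cases h1 : ((↑i : Int) + -1 < 0 ∨ (↑j : Int) < 0 ∨ (↑i : Int) + -1 = (v.length:Int) ∨ (↑j : Int) = ((pvW v : Nat):Int) ∨ ¬pyCharAt v (↑i + -1) (↑j) = some 'o')
    · rw [if_pos h1]
    · rw [if_neg h1, if_pos]
      push_neg at h1
      obtain ⟨hi1, -, -, -, hox⟩ := h1
      by_cases h2i : 2 ≤ i
      · have c1 : pyCharAt v (↑i + -1) (↑j) = pvAt v (i-1) j := by
          have h : ((i:Int) + -1) = ((i-1 : Nat) : Int) := by omega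
          rw [h, pyCharAt_cast]
        have c2 : pyCharAt v (↑i + -1 + -1) (↑j) = pvAt v (i-2) j := by
          have h : ((i:Int) + -1 + -1) = ((i-2 : Nat) : Int) := by omega
          rw [h, pyCharAt_cast]
        rw [c1] at hox
        right; right; right; right
        rw [c2]
        intro hwx
        apply hH
        refine ⟨h2i, ?_⟩
        simp only [pvV, Bool.and_eq_true, beq_iff_eq]
        have e1 : i - 2 + 1 = i - 1 := by omega
        have e2 : i - 2 + 2 = i := by omega
        rw [e1, e2]
        exact ⟨⟨hwx, hox⟩, hC⟩
      · left
        omega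


-- one grid cell of A's loop: the k-loop appends to the four buckets according to the
-- four direction conditions
theorem pv_A_cell (v : List String) (i j : Nat) (hi : i < v.length) (hj : j < pvW v)
    (d0 d1 d2 d3 : List (List Int)) :
    (if (pyCharAt v (↑i : Int) (↑j : Int) == some 'c') = true then
      (PySem.List.pyRange 0 4).foldl (fun dc k =>
        if (↑i : Int) + PySem.List.pyGetD [0,1,0,-1] k 0 < 0 ∨ (↑j : Int) + PySem.List.pyGetD [1,0,-1,0] k 0 < 0 ∨
           (↑i : Int) + PySem.List.pyGetD [0,1,0,-1] k 0 = (v.length:Int) ∨ (↑j : Int) + PySem.List.pyGetD [1,0,-1,0] k 0 = ((pvW v : Nat):Int) ∨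
           ¬(pyCharAt v ((↑i : Int) + PySem.List.pyGetD [0,1,0,-1] k 0) ((↑j : Int) + PySem.List.pyGetD [1,0,-1,0] k 0) == some 'o') = true then dc
        else if (↑i : Int) + PySem.List.pyGetD [0,1,0,-1] k 0 + PySem.List.pyGetD [0,1,0,-1] k 0 < 0 ∨ (↑j : Int) + PySem.List.pyGetD [1,0,-1,0] k 0 + PySem.List.pyGetD [1,0,-1,0] k 0 < 0 ∨
           (↑i : Int) + PySem.List.pyGetD [0,1,0,-1] k 0 + PySem.List.pyGetD [0,1,0,-1] k 0 = (v.length:Int) ∨ (↑j : Int) + PySem.List.pyGetD [1,0,-1,0] k 0 + PySem.List.pyGetD [1,0,-1,0] k 0 = ((pvW v : Nat):Int) ∨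
           ¬(pyCharAt v ((↑i : Int) + PySem.List.pyGetD [0,1,0,-1] k 0 + PySem.List.pyGetD [0,1,0,-1] k 0) ((↑j : Int) + PySem.List.pyGetD [1,0,-1,0] k 0 + PySem.List.pyGetD [1,0,-1,0] k 0) == some 'w') = true then dc
        else dc.set k.toNat (dc.getD k.toNat [] ++ [[(↑j : Int), (↑i : Int)]])) [d0,d1,d2,d3]
     else [d0,d1,d2,d3])
    = [d0 ++ (if pvH v 'c' 'o' 'w' i j = true then [[(j:Int),(i:Int)]] else []),
       d1 ++ (if pvV v 'c' 'o' 'w' i j = true then [[(j:Int),(i:Int)]] else []),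
       d2 ++ (if 2 ≤ j ∧ pvH v 'w' 'o' 'c' i (j-2) = true then [[(j:Int),(i:Int)]] else []),
       d3 ++ (if 2 ≤ i ∧ pvV v 'w' 'o' 'c' (i-2) j = true then [[(j:Int),(i:Int)]] else [])] := by
  by_cases hC' : (pyCharAt v (↑i : Int) (↑j : Int) == some 'c') = true
  · have hC : pvAt v i j = some 'c' := by rw [← pyCharAt_cast]; exact beq_iff_eq.mp hC'
    rw [if_pos hC']
    rw [show PySem.List.pyRange 0 4 = [0,1,2,3] from rfl]
    simp only [List.foldl_cons, List.foldl_nil]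
    rw [pv_step0 v i j hi hj hC d0 d1 d2 d3,
        pv_step1 v i j hi hj hC _ d1 d2 d3,
        pv_step2 v i j hi hj hC _ _ d2 d3,
        pv_step3 v i j hi hj hC _ _ _ d3]
  · have hC : ¬ pvAt v i j = some 'c' := by
      rw [← pyCharAt_cast]; exact fun h => hC' (beq_iff_eq.mpr h)
    rw [if_neg hC']
    have e0 : pvH v 'c' 'o' 'w' i j = false := by
      rw [pvH]
      simp only [Bool.and_eq_false_iff, beq_eq_false_iff_ne, ne_eq]
      left; left; right; exact hC
    have e1 : pvV v 'c' 'o' 'w' i j = false := by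
      rw [pvV]
      simp only [Bool.and_eq_false_iff, beq_eq_false_iff_ne, ne_eq]
      left; left; exact hC
    have e2 : ¬ (2 ≤ j ∧ pvH v 'w' 'o' 'c' i (j-2) = true) := by
      rintro ⟨h2j, hH⟩
      simp only [pvH, Bool.and_eq_true, decide_eq_true_eq, beq_iff_eq] at hH
      obtain ⟨-, hcc⟩ := hH
      rw [show j - 2 + 2 = j by omega] at hcc
      exact hC hcc
    have e3 : ¬ (2 ≤ i ∧ pvV v 'w' 'o' 'c' (i-2) j = true) := by
      rintro ⟨h2i, hH⟩
      simp only [pvV, Bool.and_eq_true, beq_iff_eq] at hH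
      obtain ⟨-, hcc⟩ := hH
      rw [show i - 2 + 2 = i by omega] at hcc
      exact hC hcc
    rw [if_neg (by rw [e0]; exact Bool.false_ne_true), if_neg (by rw [e1]; exact Bool.false_ne_true),
        if_neg e2, if_neg e3]
    simp

theorem pv_A_fold (v : List String) :
    List.foldl (fun (dc : List (List (List Int))) (i : Nat) =>
      List.foldl (fun dc (j : Nat) =>
        if (pyCharAt v (i : Int) (j : Int) == some 'c') = true then
          (PySem.List.pyRange 0 4).foldl (fun dc k =>
            if (i : Int) + PySem.List.pyGetD [0,1,0,-1] k 0 < 0 ∨ (j : Int) + PySem.List.pyGetD [1,0,-1,0] k 0 < 0 ∨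
               i + PySem.List.pyGetD [0,1,0,-1] k 0 = (v.length:Int) ∨ (j : Int) + PySem.List.pyGetD [1,0,-1,0] k 0 = ((pvW v : Nat):Int) ∨
               ¬(pyCharAt v ((i : Int) + PySem.List.pyGetD [0,1,0,-1] k 0) ((j : Int) + PySem.List.pyGetD [1,0,-1,0] k 0) == some 'o') = true then dc
            else if (i : Int) + PySem.List.pyGetD [0,1,0,-1] k 0 + PySem.List.pyGetD [0,1,0,-1] k 0 < 0 ∨ (j : Int) + PySem.List.pyGetD [1,0,-1,0] k 0 + PySem.List.pyGetD [1,0,-1,0] k 0 < 0 ∨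
               i + PySem.List.pyGetD [0,1,0,-1] k 0 + PySem.List.pyGetD [0,1,0,-1] k 0 = (v.length:Int) ∨ (j : Int) + PySem.List.pyGetD [1,0,-1,0] k 0 + PySem.List.pyGetD [1,0,-1,0] k 0 = ((pvW v : Nat):Int) ∨
               ¬(pyCharAt v ((i : Int) + PySem.List.pyGetD [0,1,0,-1] k 0 + PySem.List.pyGetD [0,1,0,-1] k 0) ((j : Int) + PySem.List.pyGetD [1,0,-1,0] k 0 + PySem.List.pyGetD [1,0,-1,0] k 0) == some 'w') = true then dc
            else dc.set k.toNat (dc.getD k.toNat [] ++ [[(j : Int), (i : Int)]])) dc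
        else dc) dc (List.range (pvW v))) [[],[],[],[]]
      (List.range v.length)
    = [pvF0 v, pvF1 v, pvF2 v, pvF3 v] := by
  rw [pv_quadL (List.range v.length) _
    (fun i => (List.range (pvW v)).flatMap (fun t => if pvH v 'c' 'o' 'w' i t = true then [[(t:Int),(i:Int)]] else []))
    (fun i => (List.range (pvW v)).flatMap (fun t => if pvV v 'c' 'o' 'w' i t = true then [[(t:Int),(i:Int)]] else []))
    (fun i => (List.range (pvW v)).flatMap (fun t => if 2 ≤ t ∧ pvH v 'w' 'o' 'c' i (t-2) = true then [[(t:Int),(i:Int)]] else []))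
    (fun i => (List.range (pvW v)).flatMap (fun t => if 2 ≤ i ∧ pvV v 'w' 'o' 'c' (i-2) t = true then [[(t:Int),(i:Int)]] else []))
    ?_ [] [] [] []]
  · simp [pvF0, pvF1, pvF2, pvF3]
  · intro d0 d1 d2 d3 i hi
    rw [List.mem_range] at hi
    rw [pv_quadL (List.range (pvW v)) _
      (fun t => if pvH v 'c' 'o' 'w' i t = true then [[(t:Int),(i:Int)]] else [])
      (fun t => if pvV v 'c' 'o' 'w' i t = true then [[(t:Int),(i:Int)]] else [])
      (fun t => if 2 ≤ t ∧ pvH v 'w' 'o' 'c' i (t-2) = true then [[(t:Int),(i:Int)]] else [])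
      (fun t => if 2 ≤ i ∧ pvV v 'w' 'o' 'c' (i-2) t = true then [[(t:Int),(i:Int)]] else [])
      ?_ d0 d1 d2 d3]
    intro e0 e1 e2 e3 j hj
    rw [List.mem_range] at hj
    exact pv_A_cell v i j hi hj e0 e1 e2 e3


theorem pv_pyRange_zero_int (b : Int) :
    PySem.List.pyRange 0 b = (List.range b.toNat).map (fun (k : Nat) => (k : Int)) := by
  rw [PySem.List.pyRange_one]
  simp

theorem pv_join_nil (ps : List (List Char)) : PySem.Chars.join [] ps = ps.flatten := by
  rw [PySem.Chars.join]
  induction ps with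
  | nil => rfl
  | cons a t ih =>
    cases t with
    | nil => simp [List.intercalate]
    | cons b t2 =>
      rw [List.intercalate] at ih
      simp only [List.intercalate, List.intersperse, List.flatten_cons] at *
      rw [ih]
      simp

theorem pv_flatten_map_singleton {α : Type} (l : List α) (f : α → Char) :
    (l.map (fun x => [f x])).flatten = l.map f := by
  induction l with
  | nil => rfl
  | cons x t ih => simp only [List.map_cons, List.flatten_cons, ih, List.singleton_append]

-- column j of the grid, as the list of characters B's column string holds
def pvColChars (v : List String) (j : Nat) : List Char := v.map (fun s => s.toList.getD j ' ')

theorem pv_at_eq (v : List String) (r t : Nat) (hr : r < v.length) :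
    pvAt v r t = (v[r]'hr).toList[t]? := by
  rw [pvAt, List.getElem?_eq_getElem hr]
  rfl

theorem pv_colchar (v : List String) (j x : Nat) (ch : Char)
    (hrows : ∀ s ∈ v, pvW v ≤ s.toList.length) (hj : j < pvW v) :
    (pvColChars v j)[x]? = some ch ↔ pvAt v x j = some ch := by
  rw [pvColChars, List.getElem?_map, pvAt]
  cases h : v[x]? with
  | none => simp
  | some s =>
    have hs : s ∈ v := List.mem_of_getElem? h
    have hlen : j < s.toList.length := lt_of_lt_of_le hj (hrows s hs)
    simp only [Option.map_some, Option.bind]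
    rw [List.getD_eq_getElem?_getD, List.getElem?_eq_getElem hlen]
    simp

theorem pv_streq_iff (s p : String) : ((s == p) = true) ↔ s.toList = p.toList :=
  ⟨fun h => by rw [beq_iff_eq.mp h], fun h => beq_iff_eq.mpr (String.ext h)⟩

theorem pv_slice3_toList (s : String) (t : Nat) :
    (PySem.Str.slice s (some (t:Int)) (some ((t:Int)+3))).toList = (s.toList.drop t).take 3 := by
  have h3 : ((t:Int)+3) = ((t+3 : Nat) : Int) := by omega
  rw [h3]
  simp only [PySem.Str.toList_slice, PySem.Chars.slice, PySem.List.slice_natCast]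
  congr 1
  omega

theorem pv_rowcond (v : List String) (r t : Nat) (hr : r < v.length)
    (hwd : pvW v ≤ (v[r]'hr).toList.length) (s : String)
    (hsl : s.toList = (v[r]'hr).toList.take (pvW v)) (a b c : Char) (p : String)
    (hp : p.toList = [a, b, c]) :
    ((PySem.Str.slice s (some (t:Int)) (some ((t:Int)+3)) == p) = true) ↔
      (decide (t + 2 < pvW v) && (pvAt v r t == some a) && (pvAt v r (t+1) == some b) &&
        (pvAt v r (t+2) == some c)) = true := by
  rw [pv_streq_iff, pv_slice3_toList, hsl, hp, pv_droptake3_iff]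
  simp only [List.getElem?_take, Bool.and_eq_true, decide_eq_true_eq, beq_iff_eq,
    pv_at_eq v r _ hr]
  constructor
  · rintro ⟨h0, h1, h2⟩
    split_ifs at h0 h1 h2 with q0 q1 q2
    · exact ⟨⟨⟨q2, h0⟩, h1⟩, h2⟩
  · rintro ⟨⟨⟨hb, h0⟩, h1⟩, h2⟩
    refine ⟨?_, ?_, ?_⟩ <;> rw [if_pos (by omega)] <;> assumption

theorem pv_colcond (v : List String) (j t : Nat)
    (hrows : ∀ s ∈ v, pvW v ≤ s.toList.length) (hj : j < pvW v) (s : String)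
    (hsl : s.toList = pvColChars v j) (a b c : Char) (p : String)
    (hp : p.toList = [a, b, c]) :
    ((PySem.Str.slice s (some (t:Int)) (some ((t:Int)+3)) == p) = true) ↔
      ((pvAt v t j == some a) && (pvAt v (t+1) j == some b) && (pvAt v (t+2) j == some c)) = true := by
  rw [pv_streq_iff, pv_slice3_toList, hsl, hp, pv_droptake3_iff]
  simp only [Bool.and_eq_true, beq_iff_eq, pv_colchar v j _ _ hrows hj]
  tauto

theorem pv_A_char (v : List String) (hne : v ≠ [])
    (hrows : ∀ s ∈ v, pvW v ≤ s.toList.length) :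
    find_wrong_way_cow v = pvPick [pvF0 v, pvF1 v, pvF2 v, pvF3 v] := by
  have hm : PySem.Str.len ((PySem.List.pyGet? v 0).getD "") = ((pvW v : Nat) : Int) := by
    obtain ⟨s, t, rfl⟩ : ∃ s t, v = s :: t := by
      cases v with | nil => exact absurd rfl hne | cons s t => exact ⟨s, t, rfl⟩
    rw [PySem.List.pyGet?_zero_cons]
    simp [PySem.Str.len_eq, pvW]
  simp only [find_wrong_way_cow, hm, PySem.List.pyRange_zero_natCast, List.foldl_map]
  rw [pv_A_fold v]
  rfl


theorem pv_B_row (v : List String) (r : Nat) (hr : r < v.length)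
    (hwd : pvW v ≤ (v[r]'hr).toList.length) (s : String)
    (hsl : s.toList = (v[r]'hr).toList.take (pvW v))
    (e0 e1 e2 e3 : List (List Int)) :
    (PySem.List.pyRange 0 (PySem.Str.len s - 2)).foldl (fun bk (i : Int) =>
      if (PySem.Str.slice s (some i) (some (i+3)) == "cow") = true then
        (bk.1 ++ [[i, (r:Int)]], bk.2.1, bk.2.2.1, bk.2.2.2)
      else if (PySem.Str.slice s (some i) (some (i+3)) == "woc") = true then
        (bk.1, bk.2.1, bk.2.2.1 ++ [[i+2, (r:Int)]], bk.2.2.2)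
      else bk) (e0, e1, e2, e3)
    = (e0 ++ (List.range (pvW v)).flatMap (fun t => if pvH v 'c' 'o' 'w' r t = true then [[(t:Int),(r:Int)]] else []),
       e1,
       e2 ++ (List.range (pvW v)).flatMap (fun t => if pvH v 'w' 'o' 'c' r t = true then [[(t:Int)+2,(r:Int)]] else []),
       e3) := by
  have hslen : s.toList.length = pvW v := by
    rw [hsl, List.length_take]; omega
  have hlen : PySem.Str.len s = ((pvW v : Nat) : Int) := by
    rw [PySem.Str.len_eq, hslen]
  have hrg : PySem.List.pyRange 0 (((pvW v : Nat):Int) - 2) =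
      (List.range (pvW v - 2)).map (fun (k : Nat) => (k : Int)) := by
    rw [pv_pyRange_zero_int]
    congr 2
    omega
  rw [hlen, hrg, List.foldl_map]
  rw [pv_quadP (List.range (pvW v - 2)) _
    (fun t => if pvH v 'c' 'o' 'w' r t = true then [[(t:Int),(r:Int)]] else [])
    (fun _ => [])
    (fun t => if pvH v 'w' 'o' 'c' r t = true then [[(t:Int)+2,(r:Int)]] else [])
    (fun _ => []) ?_ e0 e1 e2 e3]
  · rw [pv_restrict (pvW v) (pvW v - 2) (by omega)
        (fun t => if pvH v 'c' 'o' 'w' r t = true then [[(t:Int),(r:Int)]] else [])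
        (fun t ht => by
          dsimp only; rw [if_neg]; intro hH
          simp only [pvH, Bool.and_eq_true, decide_eq_true_eq] at hH
          omega),
        pv_restrict (pvW v) (pvW v - 2) (by omega)
        (fun t => if pvH v 'w' 'o' 'c' r t = true then [[(t:Int)+2,(r:Int)]] else [])
        (fun t ht => by
          dsimp only; rw [if_neg]; intro hH
          simp only [pvH, Bool.and_eq_true, decide_eq_true_eq] at hH
          omega)]
    simp
  · intro d0 d1 d2 d3 t ht
    dsimp only
    rw [List.mem_range] at ht
    have hcow := pv_rowcond v r t hr hwd s hsl 'c' 'o' 'w' "cow" rfl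
    have hwoc := pv_rowcond v r t hr hwd s hsl 'w' 'o' 'c' "woc" rfl
    rw [← pvH] at hcow hwoc
    have hexcl : ¬ (pvH v 'c' 'o' 'w' r t = true ∧ pvH v 'w' 'o' 'c' r t = true) := by
      rintro ⟨hA, hB⟩
      simp only [pvH, Bool.and_eq_true, beq_iff_eq, decide_eq_true_eq] at hA hB
      obtain ⟨⟨⟨-, ha⟩, -⟩, -⟩ := hA
      obtain ⟨⟨⟨-, hb⟩, -⟩, -⟩ := hB
      rw [ha] at hb
      exact absurd hb (by decide)
    by_cases h1 : (PySem.Str.slice s (some ((t:Nat):Int)) (some (((t:Nat):Int)+3)) == "cow") = true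
    · rw [if_pos h1, if_pos (hcow.mp h1), if_neg (fun hB => hexcl ⟨hcow.mp h1, hB⟩)]
      simp
    · by_cases h2 : (PySem.Str.slice s (some ((t:Nat):Int)) (some (((t:Nat):Int)+3)) == "woc") = true
      · rw [if_neg h1, if_pos h2, if_neg (fun hA => h1 (hcow.mpr hA)), if_pos (hwoc.mp h2)]
        simp
      · rw [if_neg h1, if_neg h2, if_neg (fun hA => h1 (hcow.mpr hA)),
            if_neg (fun hB => h2 (hwoc.mpr hB))]
        simp

theorem pv_B_col (v : List String) (j : Nat)
    (hrows : ∀ s ∈ v, pvW v ≤ s.toList.length) (hj : j < pvW v) (s : String)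
    (hsl : s.toList = pvColChars v j)
    (e0 e1 e2 e3 : List (List Int)) :
    (PySem.List.pyRange 0 (PySem.Str.len s - 2)).foldl (fun bk (i : Int) =>
      if (PySem.Str.slice s (some i) (some (i+3)) == "cow") = true then
        (bk.1, bk.2.1 ++ [[(j:Int), i]], bk.2.2.1, bk.2.2.2)
      else if (PySem.Str.slice s (some i) (some (i+3)) == "woc") = true then
        (bk.1, bk.2.1, bk.2.2.1, bk.2.2.2 ++ [[(j:Int), i+2]])
      else bk) (e0, e1, e2, e3)
    = (e0,
       e1 ++ (List.range v.length).flatMap (fun t => if pvV v 'c' 'o' 'w' t j = true then [[(j:Int),(t:Int)]] else []),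
       e2,
       e3 ++ (List.range v.length).flatMap (fun t => if pvV v 'w' 'o' 'c' t j = true then [[(j:Int),(t:Int)+2]] else [])) := by
  have hslen : s.toList.length = v.length := by
    rw [hsl, pvColChars, List.length_map]
  have hlen : PySem.Str.len s = ((v.length : Nat) : Int) := by
    rw [PySem.Str.len_eq, hslen]
  have hrg : PySem.List.pyRange 0 (((v.length : Nat):Int) - 2) =
      (List.range (v.length - 2)).map (fun (k : Nat) => (k : Int)) := by
    rw [pv_pyRange_zero_int]
    congr 2
    omega
  rw [hlen, hrg, List.foldl_map]
  rw [pv_quadP (List.range (v.length - 2)) _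
    (fun _ => [])
    (fun t => if pvV v 'c' 'o' 'w' t j = true then [[(j:Int),(t:Int)]] else [])
    (fun _ => [])
    (fun t => if pvV v 'w' 'o' 'c' t j = true then [[(j:Int),(t:Int)+2]] else [])
    ?_ e0 e1 e2 e3]
  · rw [pv_restrict v.length (v.length - 2) (by omega)
        (fun t => if pvV v 'c' 'o' 'w' t j = true then [[(j:Int),(t:Int)]] else [])
        (fun t ht => by
          dsimp only; rw [if_neg]; intro hH
          simp only [pvV, Bool.and_eq_true, beq_iff_eq] at hH
          have := pvAt_lt_row hH.2
          omega),
        pv_restrict v.length (v.length - 2) (by omega)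
        (fun t => if pvV v 'w' 'o' 'c' t j = true then [[(j:Int),(t:Int)+2]] else [])
        (fun t ht => by
          dsimp only; rw [if_neg]; intro hH
          simp only [pvV, Bool.and_eq_true, beq_iff_eq] at hH
          have := pvAt_lt_row hH.2
          omega)]
    simp
  · intro d0 d1 d2 d3 t ht
    dsimp only
    rw [List.mem_range] at ht
    have hcow := pv_colcond v j t hrows hj s hsl 'c' 'o' 'w' "cow" rfl
    have hwoc := pv_colcond v j t hrows hj s hsl 'w' 'o' 'c' "woc" rfl
    rw [← pvV] at hcow hwoc
    have hexcl : ¬ (pvV v 'c' 'o' 'w' t j = true ∧ pvV v 'w' 'o' 'c' t j = true) := by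
      rintro ⟨hA, hB⟩
      simp only [pvV, Bool.and_eq_true, beq_iff_eq] at hA hB
      obtain ⟨⟨ha, -⟩, -⟩ := hA
      obtain ⟨⟨hb, -⟩, -⟩ := hB
      rw [ha] at hb
      exact absurd hb (by decide)
    by_cases h1 : (PySem.Str.slice s (some ((t:Nat):Int)) (some (((t:Nat):Int)+3)) == "cow") = true
    · rw [if_pos h1, if_pos (hcow.mp h1), if_neg (fun hB => hexcl ⟨hcow.mp h1, hB⟩)]
      simp
    · by_cases h2 : (PySem.Str.slice s (some ((t:Nat):Int)) (some (((t:Nat):Int)+3)) == "woc") = true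
      · rw [if_neg h1, if_pos h2, if_neg (fun hA => h1 (hcow.mpr hA)), if_pos (hwoc.mp h2)]
        simp
      · rw [if_neg h1, if_neg h2, if_neg (fun hA => h1 (hcow.mpr hA)),
            if_neg (fun hB => h2 (hwoc.mpr hB))]
        simp

theorem pv_enum_map_range (n : Nat) (g : Nat → String) :
    PySem.List.enumerate ((List.range n).map g) 0 =
      (List.range n).map (fun (k : Nat) => ((k:Int), g k)) := by
  rw [PySem.List.enumerate_eq_map_pyRange _ ""]
  have hl : PySem.List.len ((List.range n).map g) = ((n : Nat) : Int) := by
    simp [PySem.List.len]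
  rw [hl, pv_pyRange_zero_int, List.map_map]
  simp only [Int.toNat_natCast]
  apply List.map_congr_left
  intro k hk
  rw [List.mem_range] at hk
  simp only [Function.comp_apply, PySem.List.pyGetD_natCast]
  rw [List.getD_eq_getElem?_getD, List.getElem?_map, List.getElem?_range hk]
  rfl

theorem pv_B_char (v : List String) (hne : v ≠ [])
    (hrows : ∀ s ∈ v, pvW v ≤ s.toList.length) :
    find_wrong_way_cow_alt v = pvPick [pvF0 v, pvG1 v, pvG2 v, pvG3 v] := by
  have hm : PySem.Str.len ((PySem.List.pyGet? v 0).getD "") = ((pvW v : Nat) : Int) := by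
    obtain ⟨s, t, rfl⟩ : ∃ s t, v = s :: t := by
      cases v with | nil => exact absurd rfl hne | cons s t => exact ⟨s, t, rfl⟩
    rw [PySem.List.pyGet?_zero_cons]
    simp [PySem.Str.len_eq, pvW]
  have he1 : PySem.List.enumerate (v.map (fun s => PySem.Str.slice s none (some ((pvW v : Nat):Int)))) 0
      = (List.range v.length).map (fun (r : Nat) =>
          ((r:Int), (v.map (fun s => PySem.Str.slice s none (some ((pvW v : Nat):Int)))).getD r "")) := by
    rw [PySem.List.enumerate_eq_map_pyRange _ ""]
    have hl : PySem.List.len (v.map (fun s => PySem.Str.slice s none (some ((pvW v : Nat):Int)))) = ((v.length : Nat) : Int) := by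
      simp [PySem.List.len]
    rw [hl, pv_pyRange_zero_int, List.map_map]
    simp only [Int.toNat_natCast]
    apply List.map_congr_left
    intro r hr
    simp only [Function.comp_apply, PySem.List.pyGetD_natCast]
  have hcols : (PySem.List.pyRange 0 ((pvW v : Nat):Int)).map (fun j =>
        PySem.Str.join "" ((v.map (fun s => PySem.Str.slice s none (some ((pvW v : Nat):Int)))).map
          (fun r => PySem.Str.slice r (some j) (some (j + 1)))))
      = (List.range (pvW v)).map (fun (j : Nat) =>
        PySem.Str.join "" ((v.map (fun s => PySem.Str.slice s none (some ((pvW v : Nat):Int)))).map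
          (fun r => PySem.Str.slice r (some (j:Int)) (some ((j:Int) + 1))))) := by
    rw [pv_pyRange_zero_int, List.map_map]
    simp only [Int.toNat_natCast]
    rfl
  simp only [find_wrong_way_cow_alt, hm, he1, hcols, List.foldl_map, pv_enum_map_range]
  rw [pv_quadP (List.range v.length) _
    (fun r => (List.range (pvW v)).flatMap (fun t => if pvH v 'c' 'o' 'w' r t = true then [[(t:Int),(r:Int)]] else []))
    (fun _ => [])
    (fun r => (List.range (pvW v)).flatMap (fun t => if pvH v 'w' 'o' 'c' r t = true then [[(t:Int)+2,(r:Int)]] else []))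
    (fun _ => []) ?_ [] [] [] []]
  · rw [pv_quadP (List.range (pvW v)) _
      (fun _ => [])
      (fun j => (List.range v.length).flatMap (fun t => if pvV v 'c' 'o' 'w' t j = true then [[(j:Int),(t:Int)]] else []))
      (fun _ => [])
      (fun j => (List.range v.length).flatMap (fun t => if pvV v 'w' 'o' 'c' t j = true then [[(j:Int),(t:Int)+2]] else []))
      ?_ _ _ _ _]
    · have hnil : ∀ (l : List Nat), (l.flatMap (fun _ => ([] : List (List Int)))) = [] := by
        intro l
        rw [List.flatMap_eq_nil_iff]
        intro x _
        rfl
      rw [pvPick]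
      simp only [pvF0, pvG1, pvG2, pvG3, hnil, List.append_nil, List.nil_append]
    · intro d0 d1 d2 d3 j hj
      dsimp only
      rw [List.mem_range] at hj
      have hsl : (PySem.Str.join "" ((v.map (fun s => PySem.Str.slice s none (some ((pvW v : Nat):Int)))).map
          (fun r => PySem.Str.slice r (some (j:Int)) (some ((j:Int) + 1))))).toList = pvColChars v j := by
        rw [PySem.Str.toList_join, show "".toList = ([] : List Char) from rfl, pv_join_nil, List.map_map, List.map_map]
        have hmap : ∀ x ∈ v, (PySem.Str.slice (PySem.Str.slice x none (some ((pvW v : Nat):Int))) (some (j:Int)) (some ((j:Int) + 1))).toList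
            = [x.toList.getD j ' '] := by
          intro x hx
          have hxlen : pvW v ≤ x.toList.length := hrows x hx
          simp only [PySem.Str.toList_slice, PySem.Chars.slice]
          rw [show ((j:Int) + 1) = ((j+1 : Nat):Int) by omega,
              PySem.List.slice_natCast, PySem.List.slice_to _ (Int.natCast_nonneg _)]
          simp only [Int.toNat_natCast, PySem.Str.toList_slice, PySem.Chars.slice]
          have hj2 : j < (x.toList.take (pvW v)).length := by
            rw [List.length_take]; omega
          rw [List.drop_eq_getElem_cons hj2]
          simp only [Nat.add_sub_cancel_left, List.take_succ_cons, List.take_zero]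
          rw [List.getElem_take, List.getD_eq_getElem?_getD, List.getElem?_eq_getElem (by omega : j < x.toList.length)]
          rfl
        rw [List.map_congr_left (f := (String.toList ∘ fun r => PySem.Str.slice r (some (j:Int)) (some ((j:Int) + 1))) ∘ fun s => PySem.Str.slice s none (some ((pvW v : Nat):Int))) hmap, pvColChars, pv_flatten_map_singleton]
      rw [pv_B_col v j hrows hj _ hsl d0 d1 d2 d3]
      simp
  · intro d0 d1 d2 d3 r hr
    dsimp only
    rw [List.mem_range] at hr
    have hsval : (v.map (fun s => PySem.Str.slice s none (some ((pvW v : Nat):Int)))).getD r ""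
        = PySem.Str.slice (v[r]'hr) none (some ((pvW v : Nat):Int)) := by
      rw [List.getD_eq_getElem?_getD, List.getElem?_map, List.getElem?_eq_getElem hr]
      rfl
    rw [hsval]
    have hsl : (PySem.Str.slice (v[r]'hr) none (some ((pvW v : Nat):Int))).toList
        = (v[r]'hr).toList.take (pvW v) := by
      simp only [PySem.Str.toList_slice, PySem.Chars.slice]
      rw [PySem.List.slice_to _ (Int.natCast_nonneg _)]
      simp
    rw [pv_B_row v r hr (hrows _ (List.getElem_mem hr)) _ hsl d0 d1 d2 d3]
    simp

theorem find_wrong_way_cow_spec : Claim_equal_find_wrong_way_cow := by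
  intro v _ hpre
  obtain ⟨hne, hrows, -⟩ := hpre
  unfold Spec_find_wrong_way_cow
  rw [pv_A_char v hne hrows, pv_B_char v hne hrows, pvF2_eq_G2]
  exact pv_pick_congr _ _ _ _ _ _ (pvF1_perm_G1 v) (pvF3_perm_G3 v)
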